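-- pv_equiv track=rewrite | github.com/hhariyanto29/word-wheels | check_levels.py | get_contiguous_runs
-- ===== SOURCE A (Python) =====
-- def get_contiguous_runs(grid, rows, cols):
--     """Find all contiguous runs of 2+ filled cells in rows and columns."""
--     runs = []
--
--     # Check rows
--     for r in range(rows):
--         run = []
--         for c in range(cols):
--             if (r, c) in grid:
--                 run.append((r, c, grid[(r, c)]))
--             else:
--                 if len(run) >= 2:
--                     runs.append(("row", r, run[:]))
--                 run = []
--         if len(run) >= 2:
--             runs.append(("row", r, run[:]))
--
--     # Check columns
--     for c in range(cols):
--         run = []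
--         for r in range(rows):
--             if (r, c) in grid:
--                 run.append((r, c, grid[(r, c)]))
--             else:
--                 if len(run) >= 2:
--                     runs.append(("col", c, run[:]))
--                 run = []
--         if len(run) >= 2:
--             runs.append(("col", c, run[:]))
--
--     return runs
-- ===== SOURCE B (Python) =====
-- def get_contiguous_runs(grid, rows, cols):
--     """Find all contiguous runs of 2+ filled cells in rows and columns.
--
--     Instead of probing every (r, c) position of the board, visit only the
--     filled cells, sorted; a run ends exactly where sorted neighbours stop
--     being adjacent.
--     """
--     cells = [(r, c) for (r, c) in grid if 0 <= r < rows and 0 <= c < cols]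
--
--     runs = []
--     run = []
--     for (r, c) in sorted(cells):
--         if run and run[-1][:2] == (r, c - 1):
--             run.append((r, c, grid[(r, c)]))
--         else:
--             if len(run) >= 2:
--                 runs.append(("row", run[0][0], run))
--             run = [(r, c, grid[(r, c)])]
--     if len(run) >= 2:
--         runs.append(("row", run[0][0], run))
--
--     run = []
--     for (c, r) in sorted((c, r) for (r, c) in cells):
--         if run and run[-1][:2] == (r - 1, c):
--             run.append((r, c, grid[(r, c)]))
--         else:
--             if len(run) >= 2:
--                 runs.append(("col", run[0][1], run))
--             run = [(r, c, grid[(r, c)])]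
--     if len(run) >= 2:
--         runs.append(("col", run[0][1], run))
--
--     return runs
-- ===== Notes on version B (the rewrite author's own statement) =====
-- stated objective: faster
-- what changed: A probes every (r,c) position of the rows x cols board with a dict membership test; B instead sorts only the filled in-bounds cells (lexicographically for the row pass, with swapped components for the column pass) and detects run boundaries as adjacency gaps between consecutive sorted cells, never touching empty positions.
import Mathlib
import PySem

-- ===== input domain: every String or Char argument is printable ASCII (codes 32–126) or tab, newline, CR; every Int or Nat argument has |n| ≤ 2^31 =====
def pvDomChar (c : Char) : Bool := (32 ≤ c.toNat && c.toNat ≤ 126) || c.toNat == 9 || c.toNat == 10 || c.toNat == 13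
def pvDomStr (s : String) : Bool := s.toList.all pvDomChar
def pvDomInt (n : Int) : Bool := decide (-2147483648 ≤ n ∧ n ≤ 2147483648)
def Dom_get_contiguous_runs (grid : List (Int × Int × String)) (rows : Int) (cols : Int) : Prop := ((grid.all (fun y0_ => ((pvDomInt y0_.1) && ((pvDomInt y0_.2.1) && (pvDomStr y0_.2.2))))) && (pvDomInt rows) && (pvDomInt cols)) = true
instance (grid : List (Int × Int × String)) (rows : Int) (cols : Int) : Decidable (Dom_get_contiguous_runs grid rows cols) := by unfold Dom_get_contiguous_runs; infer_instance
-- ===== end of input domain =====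

-- B sorts only the filled in-bounds cells and splits runs at adjacency gaps, instead of probing every board position; objective: faster.


-- ===== PORT A =====
-- `(r, c) in grid` / `grid[(r, c)]` on the dict: first (here: only) matching key.
def pvLook? (grid : List (Int × Int × String)) (r c : Int) : Option String :=
  match grid with
  | [] => none
  | (a, b, v) :: rest => if a = r ∧ b = c then some v else pvLook? rest r c

def get_contiguous_runs (grid : List (Int × Int × String)) (rows : Int) (cols : Int) : List (String × Int × (List (Int × Int × String))) :=
  -- Check rows
  let rowRuns := (PySem.List.pyRange 0 rows 1).foldl (fun runs r =>
    let st := (PySem.List.pyRange 0 cols 1).foldl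
      (fun (st : List (String × Int × List (Int × Int × String)) × List (Int × Int × String)) c =>
        match pvLook? grid r c with
        | some v => (st.1, st.2 ++ [(r, c, v)])
        | none => (if 2 ≤ st.2.length then st.1 ++ [("row", r, st.2)] else st.1, []))
      (runs, [])
    if 2 ≤ st.2.length then st.1 ++ [("row", r, st.2)] else st.1) []
  -- Check columns
  (PySem.List.pyRange 0 cols 1).foldl (fun runs c =>
    let st := (PySem.List.pyRange 0 rows 1).foldl
      (fun (st : List (String × Int × List (Int × Int × String)) × List (Int × Int × String)) r =>
        match pvLook? grid r c with
        | some v => (st.1, st.2 ++ [(r, c, v)])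
        | none => (if 2 ≤ st.2.length then st.1 ++ [("col", c, st.2)] else st.1, []))
      (runs, [])
    if 2 ≤ st.2.length then st.1 ++ [("col", c, st.2)] else st.1) rowRuns

-- ===== PORT B =====
-- grid[(r, c)]; in B only applied to keys present in grid, so the default is never read.
def pvVal (grid : List (Int × Int × String)) (r c : Int) : String := (pvLook? grid r c).getD ""

def get_contiguous_runs_alt (grid : List (Int × Int × String)) (rows : Int) (cols : Int) : List (String × Int × (List (Int × Int × String))) :=
  let cells := (grid.map (fun t => (t.1, t.2.1))).filter
    (fun p => decide (0 ≤ p.1 ∧ p.1 < rows ∧ 0 ≤ p.2 ∧ p.2 < cols))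
  -- row pass: cells sorted lexicographically (Python tuple order)
  let st1 := (PySem.List.sorted cells (fun p => toLex p) false).foldl
    (fun (st : List (String × Int × List (Int × Int × String)) × List (Int × Int × String)) p =>
      match st.2.getLast? with
      | some t =>
          if t.1 = p.1 ∧ t.2.1 = p.2 - 1 then (st.1, st.2 ++ [(p.1, p.2, pvVal grid p.1 p.2)])
          else ((if 2 ≤ st.2.length then st.1 ++ [("row", (st.2.headD (0, 0, "")).1, st.2)] else st.1),
                [(p.1, p.2, pvVal grid p.1 p.2)])
      | none => (st.1, [(p.1, p.2, pvVal grid p.1 p.2)]))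
    ([], [])
  let runs1 := if 2 ≤ st1.2.length then st1.1 ++ [("row", (st1.2.headD (0, 0, "")).1, st1.2)] else st1.1
  -- column pass: swapped pairs (c, r), sorted lexicographically
  let st2 := (PySem.List.sorted (cells.map (fun p => (p.2, p.1))) (fun q => toLex q) false).foldl
    (fun (st : List (String × Int × List (Int × Int × String)) × List (Int × Int × String)) q =>
      match st.2.getLast? with
      | some t =>
          if t.1 = q.2 - 1 ∧ t.2.1 = q.1 then (st.1, st.2 ++ [(q.2, q.1, pvVal grid q.2 q.1)])
          else ((if 2 ≤ st.2.length then st.1 ++ [("col", (st.2.headD (0, 0, "")).2.1, st.2)] else st.1),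
                [(q.2, q.1, pvVal grid q.2 q.1)])
      | none => (st.1, [(q.2, q.1, pvVal grid q.2 q.1)]))
    (runs1, [])
  if 2 ≤ st2.2.length then st2.1 ++ [("col", (st2.2.headD (0, 0, "")).2.1, st2.2)] else st2.1

-- ===== PRECONDITION & SPEC =====
-- Pre_ requires pairwise-distinct (r, c) keys: grid is a Python dict, whose keys are
-- always distinct, so no actual Python input is excluded (duplicate-key association
-- lists represent no dict).
def Pre_get_contiguous_runs (grid : List (Int × Int × String)) (rows : Int) (cols : Int) : Prop :=
  (grid.map (fun t => (t.1, t.2.1))).Nodup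
instance (grid : List (Int × Int × String)) (rows : Int) (cols : Int) : Decidable (Pre_get_contiguous_runs grid rows cols) := by unfold Pre_get_contiguous_runs; infer_instance

def pvWitness_get_contiguous_runs : (List (Int × Int × String)) × Int × Int :=
  ([(0, 0, "a"), (0, 1, "b"), (1, 1, "c")], 2, 2)

def Spec_get_contiguous_runs (grid : List (Int × Int × String)) (rows : Int) (cols : Int) (out : List (String × Int × (List (Int × Int × String)))) : Prop := out = get_contiguous_runs_alt grid rows cols
instance (grid : List (Int × Int × String)) (rows : Int) (cols : Int) (out : List (String × Int × (List (Int × Int × String)))) : Decidable (Spec_get_contiguous_runs grid rows cols out) := by unfold Spec_get_contiguous_runs; infer_instance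

-- ===== CLAIM (what is proved, stated in full; the proofs are below) =====
def Claim_equal_get_contiguous_runs : Prop := ∀ (grid : List (Int × Int × String)) (rows : Int) (cols : Int), Dom_get_contiguous_runs grid rows cols → Pre_get_contiguous_runs grid rows cols → Spec_get_contiguous_runs grid rows cols (get_contiguous_runs grid rows cols)

-- ===== LEMMAS AND PROOFS =====

-- Generic framework: a "pass" over lines k = 0..M-1 with minors m = 0..N-1.
-- P k m: the (major k, minor m) position is filled; V k m: the triple appended;
-- maj / mins: read major / minor back off a triple.

-- A's flush at an empty cell / end of a line, which names the line key k directly.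
def gCloseK (tag : String) (k : Int) (R : List (String × Int × List (Int × Int × String)))
    (u : List (Int × Int × String)) : List (String × Int × List (Int × Int × String)) :=
  if 2 ≤ u.length then R ++ [(tag, k, u)] else R

-- B's flush, which reads the key off the run's first element.
def gClose (tag : String) (maj : Int × Int × String → Int)
    (R : List (String × Int × List (Int × Int × String)))
    (u : List (Int × Int × String)) : List (String × Int × List (Int × Int × String)) :=
  if 2 ≤ u.length then R ++ [(tag, maj (u.headD (0, 0, "")), u)] else R

def gStepA (tag : String) (P : Int → Int → Bool) (V : Int → Int → Int × Int × String) (k : Int)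
    (st : List (String × Int × List (Int × Int × String)) × List (Int × Int × String)) (m : Int) :
    List (String × Int × List (Int × Int × String)) × List (Int × Int × String) :=
  if P k m then (st.1, st.2 ++ [V k m]) else (gCloseK tag k st.1 st.2, [])

def gLineA (tag : String) (P : Int → Int → Bool) (V : Int → Int → Int × Int × String) (N : Int)
    (R : List (String × Int × List (Int × Int × String))) (k : Int) :
    List (String × Int × List (Int × Int × String)) :=
  let st := (PySem.List.pyRange 0 N 1).foldl (gStepA tag P V k) (R, [])
  gCloseK tag k st.1 st.2

def gA (tag : String) (P : Int → Int → Bool) (V : Int → Int → Int × Int × String) (M N : Int)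
    (R0 : List (String × Int × List (Int × Int × String))) :
    List (String × Int × List (Int × Int × String)) :=
  (PySem.List.pyRange 0 M 1).foldl (gLineA tag P V N) R0

def gStepB (tag : String) (maj mins : Int × Int × String → Int) (V : Int → Int → Int × Int × String)
    (st : List (String × Int × List (Int × Int × String)) × List (Int × Int × String)) (p : Int × Int) :
    List (String × Int × List (Int × Int × String)) × List (Int × Int × String) :=
  match st.2.getLast? with
  | some t =>
      if maj t = p.1 ∧ mins t = p.2 - 1 then (st.1, st.2 ++ [V p.1 p.2])
      else (gClose tag maj st.1 st.2, [V p.1 p.2])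
  | none => (st.1, [V p.1 p.2])

def gPts (P : Int → Int → Bool) (M N : Int) : List (Int × Int) :=
  (PySem.List.pyRange 0 M 1).flatMap
    (fun k => ((PySem.List.pyRange 0 N 1).filter (fun m => P k m)).map (fun m => (k, m)))

theorem pvRangeToNat (N : Int) :
    PySem.List.pyRange 0 N 1 = PySem.List.pyRange 0 ((N.toNat : Int)) 1 := by
  by_cases h : N ≤ 0
  · rw [PySem.List.pyRange_one_eq_nil h, PySem.List.pyRange_one_eq_nil (by omega)]
  · rw [Int.toNat_of_nonneg (by omega)]

theorem gCloseK_eq_gClose (tag : String) (maj : Int × Int × String → Int)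
    (V : Int → Int → Int × Int × String) (k : Int)
    (hmaj : ∀ k m, maj (V k m) = k)
    (R : List (String × Int × List (Int × Int × String))) (u : List (Int × Int × String))
    (h : ∀ t ∈ u, ∃ m : Int, t = V k m) :
    gCloseK tag k R u = gClose tag maj R u := by
  cases u with
  | nil => rfl
  | cons a l =>
      unfold gCloseK gClose
      obtain ⟨m, hm⟩ := h a (by simp)
      simp [hm, hmaj]

-- The two loop states after n minors of line k.
def pvAstate (tag : String) (P : Int → Int → Bool) (V : Int → Int → Int × Int × String)
    (k : Int) (n : Nat) (A0 : List (String × Int × List (Int × Int × String))) :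
    List (String × Int × List (Int × Int × String)) × List (Int × Int × String) :=
  (PySem.List.pyRange 0 (n : Int) 1).foldl (gStepA tag P V k) (A0, [])

def pvBstate (tag : String) (maj mins : Int × Int × String → Int)
    (P : Int → Int → Bool) (V : Int → Int → Int × Int × String) (k : Int) (n : Nat)
    (st0 : List (String × Int × List (Int × Int × String)) × List (Int × Int × String)) :
    List (String × Int × List (Int × Int × String)) × List (Int × Int × String) :=
  (((PySem.List.pyRange 0 (n : Int) 1).filter (fun m => P k m)).map (fun m => (k, m))).foldl
    (gStepB tag maj mins V) st0

theorem pvRange_succ (n : Nat) :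
    PySem.List.pyRange 0 ((n + 1 : Nat) : Int) 1 = PySem.List.pyRange 0 (n : Int) 1 ++ [(n : Int)] := by
  have : ((n + 1 : Nat) : Int) = (n : Int) + 1 := by push_cast; ring
  rw [this]
  exact PySem.List.pyRange_one_succ_right (by positivity)

theorem pvAstate_succ (tag : String) (P : Int → Int → Bool) (V : Int → Int → Int × Int × String)
    (k : Int) (n : Nat) (A0 : List (String × Int × List (Int × Int × String))) :
    pvAstate tag P V k (n + 1) A0 = gStepA tag P V k (pvAstate tag P V k n A0) (n : Int) := by
  unfold pvAstate
  rw [pvRange_succ, List.foldl_append, List.foldl_cons, List.foldl_nil]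

theorem pvBstate_succ (tag : String) (maj mins : Int × Int × String → Int)
    (P : Int → Int → Bool) (V : Int → Int → Int × Int × String) (k : Int) (n : Nat)
    (st0 : List (String × Int × List (Int × Int × String)) × List (Int × Int × String)) :
    pvBstate tag maj mins P V k (n + 1) st0 =
      (if P k (n : Int) then gStepB tag maj mins V (pvBstate tag maj mins P V k n st0) (k, (n : Int))
       else pvBstate tag maj mins P V k n st0) := by
  unfold pvBstate
  rw [pvRange_succ, List.filter_append, List.map_append, List.foldl_append]
  cases h : P k (n : Int) <;> simp [List.filter, h]

-- Per-line invariant: A's inner scan over minors 0..n-1 versus B's fold over the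
-- line's filled minors, started from B-state (R, u) whose open run is from an
-- earlier line.
theorem pvLine (tag : String) (maj mins : Int × Int × String → Int)
    (P : Int → Int → Bool) (V : Int → Int → Int × Int × String)
    (hmaj : ∀ k m, maj (V k m) = k) (hmin : ∀ k m, mins (V k m) = m)
    (k : Int) (n : Nat) (R : List (String × Int × List (Int × Int × String)))
    (u : List (Int × Int × String))
    (Hin : ∀ t, u.getLast? = some t → maj t < k) :
    (((pvAstate tag P V k n (gClose tag maj R u)).2 = [] ∧
      (pvAstate tag P V k n (gClose tag maj R u)).1 =
        gClose tag maj (pvBstate tag maj mins P V k n (R, u)).1 (pvBstate tag maj mins P V k n (R, u)).2 ∧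
      (∀ t, (pvBstate tag maj mins P V k n (R, u)).2.getLast? = some t →
        maj t < k ∨ (maj t = k ∧ mins t ≤ (n : Int) - 2)))
     ∨ (pvAstate tag P V k n (gClose tag maj R u) = pvBstate tag maj mins P V k n (R, u) ∧
        (∀ t ∈ (pvAstate tag P V k n (gClose tag maj R u)).2, ∃ m : Int, t = V k m) ∧
        (pvAstate tag P V k n (gClose tag maj R u)).2.getLast? = some (V k ((n : Int) - 1)))) := by
  induction n with
  | zero =>
      left
      refine ⟨rfl, rfl, fun t ht => Or.inl (Hin t ht)⟩
  | succ n ih =>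
      set An := pvAstate tag P V k n (gClose tag maj R u) with hAn
      set Bn := pvBstate tag maj mins P V k n (R, u) with hBn
      rw [pvAstate_succ, pvBstate_succ, ← hAn, ← hBn]
      rcases ih with ⟨h2, h1, hlast⟩ | ⟨heq, hall, hlastA⟩
      · by_cases hp : P k (n : Int)
        · -- filled cell after a closed A-run
          right
          cases hBl : Bn.2.getLast? with
          | none =>
              have hBnil : Bn.2 = [] := List.getLast?_eq_none_iff.mp hBl
              have hB1 : An.1 = Bn.1 := by
                rw [h1, hBnil]; simp [gClose]
              simp only [gStepA, gStepB, hp, if_pos, hBl, h2, hB1]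
              refine ⟨rfl, ?_, ?_⟩
              · intro t ht
                simp at ht
                exact ⟨(n : Int), by rw [ht]⟩
              · simp
          | some t =>
              have hne : ¬ (maj t = k ∧ mins t = (n : Int) - 1) := by
                rcases hlast t hBl with h | ⟨ha, hb⟩ <;> [exact fun hc => absurd hc.1 (by omega); exact fun hc => by omega]
              simp only [gStepA, gStepB, hp, if_pos, hBl, if_neg hne, h2]
              refine ⟨?_, ?_, ?_⟩
              · exact Prod.ext (by simpa using h1) (by simp)
              · intro t' ht'
                simp at ht'
                exact ⟨(n : Int), by rw [ht']⟩
              · simp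
        · -- empty cell after a closed A-run
          left
          simp only [gStepA, hp, Bool.false_eq_true, if_false, h2]
          refine ⟨by simp, ?_, ?_⟩
          · simpa [gCloseK] using h1
          · intro t ht
            rcases hlast t ht with h | ⟨ha, hb⟩
            · exact Or.inl h
            · exact Or.inr ⟨ha, by push_cast; omega⟩
      · -- A-run open: it is exactly B's run, of line k, ending at minor n - 1
        have hA2 : An.2 = Bn.2 := by rw [heq]
        have hBl : Bn.2.getLast? = some (V k ((n : Int) - 1)) := by rw [← hA2]; exact hlastA
        by_cases hp : P k (n : Int)
        · right
          have hyes : maj (V k ((n : Int) - 1)) = k ∧ mins (V k ((n : Int) - 1)) = (n : Int) - 1 := ⟨hmaj _ _, hmin _ _⟩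
          simp only [gStepA, gStepB, hp, if_pos, hBl, hyes, if_pos, heq]
          refine ⟨rfl, ?_, ?_⟩
          · intro t' ht'
            rw [← heq] at ht'
            simp at ht'
            rcases ht' with h | h
            · exact hall t' h
            · exact ⟨(n : Int), by rw [h]⟩
          · rw [← heq]
            simp
        · left
          simp only [gStepA, hp, Bool.false_eq_true, if_false]
          refine ⟨by simp, ?_, ?_⟩
          · rw [heq, gCloseK_eq_gClose tag maj V k hmaj Bn.1 Bn.2 (by rw [← hA2]; exact hall)]
          · intro t ht
            rw [hBl] at ht
            injection ht with ht
            exact Or.inr ⟨by rw [← ht, hmaj], by rw [← ht, hmin]; push_cast; omega⟩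

-- Whole pass: B's single fold over all filled points (grouped by line) closed at
-- the end equals A's nested scan.
theorem pvPassAux (tag : String) (maj mins : Int × Int × String → Int)
    (P : Int → Int → Bool) (V : Int → Int → Int × Int × String)
    (hmaj : ∀ k m, maj (V k m) = k) (hmin : ∀ k m, mins (V k m) = m)
    (Kn : Nat) (N : Int) (R0 : List (String × Int × List (Int × Int × String))) :
    (let b := (gPts P (Kn : Int) N).foldl (gStepB tag maj mins V) (R0, []);
     gClose tag maj b.1 b.2 = (PySem.List.pyRange 0 (Kn : Int) 1).foldl (gLineA tag P V N) R0 ∧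
     (∀ t, b.2.getLast? = some t → maj t < (Kn : Int))) := by
  induction Kn with
  | zero =>
      constructor
      · simp [gPts, gClose, PySem.List.pyRange_one_eq_nil (le_refl (0 : Int))]
      · intro t ht
        simp [gPts, PySem.List.pyRange_one_eq_nil (le_refl (0 : Int))] at ht
  | succ K ih =>
      obtain ⟨hEq, hLt⟩ := ih
      have hsplit : gPts P ((K + 1 : Nat) : Int) N =
          gPts P (K : Int) N ++
            ((PySem.List.pyRange 0 N 1).filter (fun m => P (K : Int) m)).map (fun m => ((K : Int), m)) := by
        unfold gPts
        rw [pvRange_succ, List.flatMap_append]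
        simp
      have hAsplit : (PySem.List.pyRange 0 ((K + 1 : Nat) : Int) 1).foldl (gLineA tag P V N) R0 =
          gLineA tag P V N ((PySem.List.pyRange 0 (K : Int) 1).foldl (gLineA tag P V N) R0) (K : Int) := by
        rw [pvRange_succ, List.foldl_append, List.foldl_cons, List.foldl_nil]
      set b := (gPts P (K : Int) N).foldl (gStepB tag maj mins V) (R0, []) with hb
      have hline := pvLine tag maj mins P V hmaj hmin (K : Int) N.toNat b.1 b.2
        (fun t ht => hLt t ht)
      have hBfold : (gPts P ((K + 1 : Nat) : Int) N).foldl (gStepB tag maj mins V) (R0, []) =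
          pvBstate tag maj mins P V (K : Int) N.toNat (b.1, b.2) := by
        rw [hsplit, List.foldl_append, ← hb]
        unfold pvBstate
        rw [← pvRangeToNat]
      have hAfold : (PySem.List.pyRange 0 ((K + 1 : Nat) : Int) 1).foldl (gLineA tag P V N) R0 =
          gCloseK tag (K : Int) (pvAstate tag P V (K : Int) N.toNat (gClose tag maj b.1 b.2)).1
            (pvAstate tag P V (K : Int) N.toNat (gClose tag maj b.1 b.2)).2 := by
        rw [hAsplit, ← hEq]
        unfold gLineA pvAstate
        rw [← pvRangeToNat]
      rw [hBfold, hAfold]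
      set A2 := pvAstate tag P V (K : Int) N.toNat (gClose tag maj b.1 b.2) with hA2
      set B2 := pvBstate tag maj mins P V (K : Int) N.toNat (b.1, b.2) with hB2
      have hcast : ((K + 1 : Nat) : Int) = (K : Int) + 1 := by push_cast; ring
      rcases hline with ⟨h2, h1, hlast⟩ | ⟨heq, hall, hlastA⟩
      · constructor
        · rw [h2]
          simpa [gCloseK] using h1.symm
        · intro t ht
          rcases hlast t ht with h | ⟨ha, _⟩
          · omega
          · omega
      · constructor
        · rw [heq, gCloseK_eq_gClose tag maj V (K : Int) hmaj B2.1 B2.2 (by rw [← heq]; exact hall)]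
        · intro t ht
          rw [← heq, hlastA] at ht
          injection ht with ht
          rw [← ht, hmaj]
          omega

theorem pvPass (tag : String) (maj mins : Int × Int × String → Int)
    (P : Int → Int → Bool) (V : Int → Int → Int × Int × String)
    (hmaj : ∀ k m, maj (V k m) = k) (hmin : ∀ k m, mins (V k m) = m)
    (M N : Int) (R0 : List (String × Int × List (Int × Int × String))) :
    gClose tag maj ((gPts P M N).foldl (gStepB tag maj mins V) (R0, [])).1
      ((gPts P M N).foldl (gStepB tag maj mins V) (R0, [])).2 = gA tag P V M N R0 := by
  have h1 : gPts P M N = gPts P ((M.toNat : Int)) N := by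
    unfold gPts; rw [pvRangeToNat M]
  have h2 : gA tag P V M N R0 = gA tag P V ((M.toNat : Int)) N R0 := by
    unfold gA; rw [pvRangeToNat M]
  rw [h1, h2]
  exact (pvPassAux tag maj mins P V hmaj hmin M.toNat N R0).1

-- Proof-side names for the pieces of the two ports.
def pvProw (grid : List (Int × Int × String)) : Int → Int → Bool :=
  fun k m => (pvLook? grid k m).isSome
def pvVrow (grid : List (Int × Int × String)) : Int → Int → Int × Int × String :=
  fun k m => (k, m, pvVal grid k m)
def pvPcol (grid : List (Int × Int × String)) : Int → Int → Bool :=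
  fun k m => (pvLook? grid m k).isSome
def pvVcol (grid : List (Int × Int × String)) : Int → Int → Int × Int × String :=
  fun k m => (m, k, pvVal grid m k)
def pvCells (grid : List (Int × Int × String)) (rows cols : Int) : List (Int × Int) :=
  (grid.map (fun t => (t.1, t.2.1))).filter
    (fun p => decide (0 ≤ p.1 ∧ p.1 < rows ∧ 0 ≤ p.2 ∧ p.2 < cols))

theorem pvLook?_isSome (grid : List (Int × Int × String)) (r c : Int) :
    (pvLook? grid r c).isSome = true ↔ (r, c) ∈ grid.map (fun t => (t.1, t.2.1)) := by
  induction grid with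
  | nil => simp [pvLook?]
  | cons a rest ih =>
      obtain ⟨x, y, v⟩ := a
      by_cases h : x = r ∧ y = c
      · simp [pvLook?, h, Prod.ext_iff]
      · simp [pvLook?, h, ih, Prod.ext_iff]
        intro h1 h2
        exact absurd ⟨h1.symm, h2.symm⟩ h

theorem gPts_mem (P : Int → Int → Bool) (M N : Int) (p : Int × Int) :
    p ∈ gPts P M N ↔ (0 ≤ p.1 ∧ p.1 < M ∧ 0 ≤ p.2 ∧ p.2 < N ∧ P p.1 p.2 = true) := by
  obtain ⟨a, b⟩ := p
  unfold gPts
  simp [List.mem_flatMap, List.mem_filter, List.mem_map, PySem.List.mem_pyRange_one,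
    Prod.ext_iff]
  tauto

theorem gPts_pairwise (P : Int → Int → Bool) (M N : Int) :
    (gPts P M N).Pairwise (fun a b => toLex a < toLex b) := by
  unfold gPts
  rw [List.flatMap_def, List.pairwise_flatten]
  constructor
  · intro l hl
    simp only [List.mem_map] at hl
    obtain ⟨k, _, rfl⟩ := hl
    rw [List.pairwise_map]
    refine ((PySem.List.pairwise_lt_pyRange_one (a := 0) (b := N)).filter
      (fun m => P k m)).imp ?_
    intro m m' hmm
    exact Prod.Lex.toLex_lt_toLex.mpr (Or.inr ⟨rfl, hmm⟩)
  · rw [List.pairwise_map]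
    refine (PySem.List.pairwise_lt_pyRange_one (a := 0) (b := M)).imp ?_
    intro k k' hkk x hx y hy
    simp only [List.mem_map] at hx hy
    obtain ⟨m, _, rfl⟩ := hx
    obtain ⟨m', _, rfl⟩ := hy
    exact Prod.Lex.toLex_lt_toLex.mpr (Or.inl hkk)

theorem gPts_nodup (P : Int → Int → Bool) (M N : Int) : (gPts P M N).Nodup := by
  refine (gPts_pairwise P M N).imp ?_
  intro a b h hab
  rw [hab] at h
  exact lt_irrefl _ h

theorem pvCells_sorted (grid : List (Int × Int × String)) (rows cols : Int)
    (hpre : (grid.map (fun t => (t.1, t.2.1))).Nodup) :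
    PySem.List.sorted (pvCells grid rows cols) (fun p => toLex p) false =
      gPts (pvProw grid) rows cols := by
  apply PySem.List.sorted_eq_of_perm_of_pairwise_lt
  · unfold pvCells
    rw [List.perm_ext_iff_of_nodup (gPts_nodup _ _ _) (hpre.filter _)]
    intro p
    rw [gPts_mem]
    unfold pvProw
    rw [List.mem_filter]
    simp only [decide_eq_true_eq]
    rw [pvLook?_isSome]
    tauto
  · exact gPts_pairwise _ _ _

theorem pvCellsSwap_sorted (grid : List (Int × Int × String)) (rows cols : Int)
    (hpre : (grid.map (fun t => (t.1, t.2.1))).Nodup) :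
    PySem.List.sorted ((pvCells grid rows cols).map (fun p => (p.2, p.1))) (fun q => toLex q) false =
      gPts (pvPcol grid) cols rows := by
  apply PySem.List.sorted_eq_of_perm_of_pairwise_lt
  · have hnodup : ((pvCells grid rows cols).map (fun p => (p.2, p.1))).Nodup := by
      refine (hpre.filter _).map ?_
      intro a b hab
      exact Prod.ext (congrArg Prod.snd hab) (congrArg Prod.fst hab)
    rw [List.perm_ext_iff_of_nodup (gPts_nodup _ _ _) hnodup]
    intro q
    rw [gPts_mem]
    unfold pvPcol
    rw [pvLook?_isSome]
    constructor
    · rintro ⟨h1, h2, h3, h4, h5⟩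
      refine List.mem_map.mpr ⟨(q.2, q.1), ?_, rfl⟩
      unfold pvCells
      rw [List.mem_filter]
      simp only [decide_eq_true_eq]
      exact ⟨h5, h3, h4, h1, h2⟩
    · intro hq
      obtain ⟨p, hp, rfl⟩ := List.mem_map.mp hq
      unfold pvCells at hp
      rw [List.mem_filter] at hp
      simp only [decide_eq_true_eq] at hp
      exact ⟨hp.2.2.2.1, hp.2.2.2.2, hp.2.1, hp.2.2.1, hp.1⟩
  · exact gPts_pairwise _ _ _

theorem pvA_eq (grid : List (Int × Int × String)) (rows cols : Int) :
    get_contiguous_runs grid rows cols =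
      gA "col" (pvPcol grid) (pvVcol grid) cols rows
        (gA "row" (pvProw grid) (pvVrow grid) rows cols []) := by
  have hR : (fun (runs : List (String × Int × List (Int × Int × String))) (r : Int) =>
      let st := (PySem.List.pyRange 0 cols 1).foldl
        (fun (st : List (String × Int × List (Int × Int × String)) × List (Int × Int × String)) c =>
          match pvLook? grid r c with
          | some v => (st.1, st.2 ++ [(r, c, v)])
          | none => (if 2 ≤ st.2.length then st.1 ++ [("row", r, st.2)] else st.1, []))
        (runs, [])
      if 2 ≤ st.2.length then st.1 ++ [("row", r, st.2)] else st.1)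
      = gLineA "row" (pvProw grid) (pvVrow grid) cols := by
    funext runs r
    have hstep : (fun (st : List (String × Int × List (Int × Int × String)) × List (Int × Int × String)) (c : Int) =>
        match pvLook? grid r c with
        | some v => (st.1, st.2 ++ [(r, c, v)])
        | none => (if 2 ≤ st.2.length then st.1 ++ [("row", r, st.2)] else st.1, []))
        = gStepA "row" (pvProw grid) (pvVrow grid) r := by
      funext st c
      unfold gStepA gCloseK pvProw pvVrow pvVal
      cases hv : pvLook? grid r c <;> simp
    unfold gLineA gCloseK
    rw [hstep]
  have hC : (fun (runs : List (String × Int × List (Int × Int × String))) (c : Int) =>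
      let st := (PySem.List.pyRange 0 rows 1).foldl
        (fun (st : List (String × Int × List (Int × Int × String)) × List (Int × Int × String)) r =>
          match pvLook? grid r c with
          | some v => (st.1, st.2 ++ [(r, c, v)])
          | none => (if 2 ≤ st.2.length then st.1 ++ [("col", c, st.2)] else st.1, []))
        (runs, [])
      if 2 ≤ st.2.length then st.1 ++ [("col", c, st.2)] else st.1)
      = gLineA "col" (pvPcol grid) (pvVcol grid) rows := by
    funext runs c
    have hstep : (fun (st : List (String × Int × List (Int × Int × String)) × List (Int × Int × String)) (r : Int) =>
        match pvLook? grid r c with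
        | some v => (st.1, st.2 ++ [(r, c, v)])
        | none => (if 2 ≤ st.2.length then st.1 ++ [("col", c, st.2)] else st.1, []))
        = gStepA "col" (pvPcol grid) (pvVcol grid) c := by
      funext st r
      unfold gStepA gCloseK pvPcol pvVcol pvVal
      cases hv : pvLook? grid r c <;> simp
    unfold gLineA gCloseK
    rw [hstep]
  unfold get_contiguous_runs gA
  rw [hR, hC]

theorem pvB_eq (grid : List (Int × Int × String)) (rows cols : Int) :
    get_contiguous_runs_alt grid rows cols =
      gClose "col" (fun t => t.2.1)
        ((PySem.List.sorted ((pvCells grid rows cols).map (fun p => (p.2, p.1))) (fun q => toLex q) false).foldl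
        (gStepB "col" (fun t => t.2.1) (fun t => t.1) (pvVcol grid))
        (gClose "row" (fun t => t.1) ((PySem.List.sorted (pvCells grid rows cols) (fun p => toLex p) false).foldl
            (gStepB "row" (fun t => t.1) (fun t => t.2.1) (pvVrow grid)) ([], [])).1 ((PySem.List.sorted (pvCells grid rows cols) (fun p => toLex p) false).foldl
            (gStepB "row" (fun t => t.1) (fun t => t.2.1) (pvVrow grid)) ([], [])).2, [])).1
        ((PySem.List.sorted ((pvCells grid rows cols).map (fun p => (p.2, p.1))) (fun q => toLex q) false).foldl
        (gStepB "col" (fun t => t.2.1) (fun t => t.1) (pvVcol grid))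
        (gClose "row" (fun t => t.1) ((PySem.List.sorted (pvCells grid rows cols) (fun p => toLex p) false).foldl
            (gStepB "row" (fun t => t.1) (fun t => t.2.1) (pvVrow grid)) ([], [])).1 ((PySem.List.sorted (pvCells grid rows cols) (fun p => toLex p) false).foldl
            (gStepB "row" (fun t => t.1) (fun t => t.2.1) (pvVrow grid)) ([], [])).2, [])).2 := by
  have hstepR : (fun (st : List (String × Int × List (Int × Int × String)) × List (Int × Int × String)) (p : Int × Int) =>
      match st.2.getLast? with
      | some t =>
          if t.1 = p.1 ∧ t.2.1 = p.2 - 1 then (st.1, st.2 ++ [(p.1, p.2, pvVal grid p.1 p.2)])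
          else ((if 2 ≤ st.2.length then st.1 ++ [("row", (st.2.headD (0, 0, "")).1, st.2)] else st.1),
                [(p.1, p.2, pvVal grid p.1 p.2)])
      | none => (st.1, [(p.1, p.2, pvVal grid p.1 p.2)]))
      = gStepB "row" (fun t => t.1) (fun t => t.2.1) (pvVrow grid) := by
    funext st p
    unfold gStepB gClose pvVrow
    cases hl : st.2.getLast? <;> simp
  have hstepC : (fun (st : List (String × Int × List (Int × Int × String)) × List (Int × Int × String)) (q : Int × Int) =>
      match st.2.getLast? with
      | some t =>
          if t.1 = q.2 - 1 ∧ t.2.1 = q.1 then (st.1, st.2 ++ [(q.2, q.1, pvVal grid q.2 q.1)])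
          else ((if 2 ≤ st.2.length then st.1 ++ [("col", (st.2.headD (0, 0, "")).2.1, st.2)] else st.1),
                [(q.2, q.1, pvVal grid q.2 q.1)])
      | none => (st.1, [(q.2, q.1, pvVal grid q.2 q.1)]))
      = gStepB "col" (fun t => t.2.1) (fun t => t.1) (pvVcol grid) := by
    funext st q
    unfold gStepB gClose pvVcol
    cases hl : st.2.getLast? with
    | none => simp
    | some t =>
        by_cases h1 : t.1 = q.2 - 1 <;> by_cases h2 : t.2.1 = q.1 <;>
          simp [h1, h2]
  unfold get_contiguous_runs_alt pvCells
  rw [hstepR, hstepC]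
  rfl

theorem get_contiguous_runs_spec : Claim_equal_get_contiguous_runs := by
  intro grid rows cols _hdom hpre
  show get_contiguous_runs grid rows cols = get_contiguous_runs_alt grid rows cols
  rw [pvB_eq grid rows cols, pvCells_sorted grid rows cols hpre,
      pvCellsSwap_sorted grid rows cols hpre,
      pvPass "row" (fun t => t.1) (fun t => t.2.1) (pvProw grid) (pvVrow grid)
        (fun _ _ => rfl) (fun _ _ => rfl) rows cols [],
      pvPass "col" (fun t => t.2.1) (fun t => t.1) (pvPcol grid) (pvVcol grid)
        (fun _ _ => rfl) (fun _ _ => rfl) cols rows _,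
      pvA_eq grid rows cols]
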